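-- pv_equiv track=rewrite | github.com/Sharma-Pragya/AutoTA | autota/verify/boolean.py | _convert_postfix_not
-- ===== SOURCE A (Python) =====
-- def _convert_postfix_not(expr: str) -> str:
--     """Convert postfix NOT (') to Python's prefix not.
--
--     Args:
--         expr: Expression with postfix NOT
--
--     Returns:
--         Expression with prefix not
--     """
--     result = []
--     i = 0
--     while i < len(expr):
--         if expr[i] == "'":
--             # Find what came before the '
--             if not result:
--                 raise ValueError("Invalid ' at start of expression")
--
--             # Pop the last token (could be variable or closing paren)
--             if result[-1] == ")":
--                 # Find matching opening paren
--                 paren_count = 1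
--                 j = len(result) - 2
--                 while j >= 0 and paren_count > 0:
--                     if result[j] == ")":
--                         paren_count += 1
--                     elif result[j] == "(":
--                         paren_count -= 1
--                     j -= 1
--                 # Extract the parenthesized part
--                 paren_expr = "".join(result[j + 1 :])
--                 result = result[: j + 1]
--                 result.append(f"(not {paren_expr})")
--             else:
--                 # Simple variable - scan backwards to get full identifier
--                 var_chars = []
--                 while result and (result[-1].isalnum() or result[-1] == "_"):
--                     var_chars.insert(0, result.pop())
--                 var_name = "".join(var_chars)
--                 result.append(f"(not {var_name})")
--
--             i += 1
--         else:
--             result.append(expr[i])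
--             i += 1
--
--     return "".join(result)
-- ===== SOURCE B (Python) =====
-- def _convert_postfix_not(expr: str) -> str:
--     """Single pass: a paren-index stack and a group-start table replace A's backward scans."""
--     out = []
--     stack = []        # indices in out of currently unmatched open-paren tokens
--     gstart = {}       # index of a closing-paren token in out -> start index of its parenthesized group
--     word_start = 0    # index in out where the current identifier run begins
--     for ch in expr:
--         if ch == "'":
--             s = gstart[len(out) - 1] if out and out[-1] == ")" else word_start
--             out[s:] = ["(not " + "".join(out[s:]) + ")"]
--             word_start = len(out)
--         elif ch == "(":
--             stack.append(len(out))
--             out.append(ch)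
--             word_start = len(out)
--         elif ch == ")":
--             gstart[len(out)] = stack.pop() if stack else 0
--             out.append(ch)
--             word_start = len(out)
--         else:
--             out.append(ch)
--             if not (ch.isalnum() or ch == "_"):
--                 word_start = len(out)
--     return "".join(out)
-- ===== Notes on version B (the rewrite author's own statement) =====
-- stated objective: faster
-- what changed: A rescans backwards through the output on every postfix ' (matching-paren scan / identifier popping); B is a single forward pass that maintains a stack of open-paren indices, a table mapping each closing paren to its group start, and the start index of the current identifier run, so each ' is handled without any backward scan.
-- outside the precondition, e.g. on _convert_postfix_not("'"): A raises ValueError, B returns '(not )'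
import Mathlib
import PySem

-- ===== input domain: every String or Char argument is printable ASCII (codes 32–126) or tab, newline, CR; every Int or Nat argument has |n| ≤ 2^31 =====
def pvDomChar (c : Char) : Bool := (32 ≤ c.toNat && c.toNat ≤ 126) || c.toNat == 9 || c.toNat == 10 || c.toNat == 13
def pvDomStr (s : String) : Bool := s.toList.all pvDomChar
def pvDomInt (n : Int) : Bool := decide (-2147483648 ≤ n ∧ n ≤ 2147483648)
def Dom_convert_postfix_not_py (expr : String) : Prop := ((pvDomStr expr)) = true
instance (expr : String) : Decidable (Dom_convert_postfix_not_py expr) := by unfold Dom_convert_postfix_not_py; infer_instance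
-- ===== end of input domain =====

-- B replaces A's per-' backward scans by one forward pass keeping a paren-index stack,
-- a group-start table and the start of the current identifier run (objective: faster, asymptotic).

-- ===== PORT A =====
-- Tokens of Python's `result` list of strings are `List Char`; "".join = flatten.

-- f"(not {s})"
def pvNotWrap (s : List Char) : List Char := ('(' :: 'n' :: 'o' :: 't' :: ' ' :: s) ++ [')']

-- result[-1].isalnum() or result[-1] == "_"
def pvIsWordTok (t : List Char) : Bool := PySem.Chars.strIsalnum t || t == ['_']

-- A's inner backward scan: `while j >= 0 and paren_count > 0: ...; j -= 1`
def pvScanA (res : List (List Char)) (j : Int) (cnt : Int) : Int :=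
  if _h : 0 ≤ j ∧ 0 < cnt then
    pvScanA res (j - 1) (if res.getD j.toNat [] = [')'] then cnt + 1
      else if res.getD j.toNat [] = ['('] then cnt - 1 else cnt)
  else j
termination_by (j + 1).toNat
decreasing_by omega

-- A's `while result and (result[-1].isalnum() or result[-1] == "_"): var_chars.insert(0, result.pop())`
def pvPopVar (res acc : List (List Char)) : List (List Char) × List (List Char) :=
  match h : res.getLast? with
  | some t => if pvIsWordTok t then pvPopVar res.dropLast (t :: acc) else (res, acc)
  | none => (res, acc)
termination_by res.length
decreasing_by
  have hne : res ≠ [] := by intro hn; subst hn; simp at h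
  have := List.length_pos_of_ne_nil hne
  simp [List.length_dropLast]; omega

-- one iteration of A's `while i < len(expr)` loop (the body for expr[i])
def pvStepA (res : List (List Char)) (c : Char) : List (List Char) :=
  if c = '\'' then
    match res.getLast? with
    | none => res        -- Python raises ValueError here; excluded by Pre_
    | some t =>
      if t = [')'] then
        -- j ends ≥ -1, so result[:j+1] / result[j+1:] are plain take/drop at (j+1).toNat
        let j := pvScanA res ((res.length : Int) - 2) 1
        res.take (j + 1).toNat ++ [pvNotWrap (res.drop (j + 1).toNat).flatten]
      else
        let p := pvPopVar res []
        p.1 ++ [pvNotWrap p.2.flatten]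
  else res ++ [[c]]

def convert_postfix_not_py (expr : String) : String :=
  String.ofList ((expr.toList.foldl pvStepA []).flatten)

-- ===== PORT B =====
structure PvB where
  out : List (List Char)
  stack : List Nat
  gstart : PySem.Dict Nat Nat
  wstart : Nat
deriving Repr

-- one iteration of Source B's `for ch in expr` loop
def pvStepB (st : PvB) (c : Char) : PvB :=
  if c = '\'' then
    -- gstart[len(out)-1]: the key is always present (recorded by the closing-paren branch); getD is exact there
    let s := if st.out.getLast? = some [')'] then st.gstart.getD (st.out.length - 1) 0 else st.wstart
    let out' := st.out.take s ++ [pvNotWrap (st.out.drop s).flatten]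
    { st with out := out', wstart := out'.length }
  else if c = '(' then
    { st with stack := st.stack ++ [st.out.length], out := st.out ++ [[c]],
              wstart := st.out.length + 1 }
  else if c = ')' then
    { st with gstart := st.gstart.insert st.out.length (st.stack.getLast?.getD 0),
              stack := st.stack.dropLast, out := st.out ++ [[c]],
              wstart := st.out.length + 1 }
  else
    { st with out := st.out ++ [[c]],
              wstart := if PySem.Chars.isalnum c || c = '_' then st.wstart
                        else st.out.length + 1 }

def convert_postfix_not_py_alt (expr : String) : String :=
  String.ofList ((expr.toList.foldl pvStepB ⟨[], [], PySem.Dict.empty, 0⟩).out.flatten)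

-- ===== PRECONDITION & SPEC =====
-- Pre_ excludes exactly the inputs whose first character is the postfix-NOT mark, where Python A raises ValueError.
def Pre_convert_postfix_not_py (expr : String) : Prop := expr.toList.head? ≠ some '\''
instance (expr : String) : Decidable (Pre_convert_postfix_not_py expr) := by
  unfold Pre_convert_postfix_not_py; infer_instance

def pvWitness_convert_postfix_not_py : String := "(a&b)'|c'"

def Spec_convert_postfix_not_py (expr : String) (out : String) : Prop := out = convert_postfix_not_py_alt expr
instance (expr : String) (out : String) : Decidable (Spec_convert_postfix_not_py expr out) := by unfold Spec_convert_postfix_not_py; infer_instance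

-- ===== CLAIM (what is proved, stated in full; the proofs are below) =====
def Claim_equal_convert_postfix_not_py : Prop := ∀ (expr : String), Dom_convert_postfix_not_py expr → Pre_convert_postfix_not_py expr → Spec_convert_postfix_not_py expr (convert_postfix_not_py expr)

-- ===== LEMMAS AND PROOFS =====

-- stack of indices of unmatched "(" tokens after a token list (what Source B's `stack` holds)
def pvUnmAux (S : List Nat) (i : Nat) : List (List Char) → List Nat
  | [] => S
  | t :: ts => pvUnmAux (if t = ['('] then S ++ [i] else if t = [')'] then S.dropLast else S) (i + 1) ts

def pvUnm (res : List (List Char)) : List Nat := pvUnmAux [] 0 res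

-- the word-suffix invariant for Source B's word_start
def pvW (res : List (List Char)) (w : Nat) : Prop :=
  w ≤ res.length ∧ (∀ t ∈ res.drop w, pvIsWordTok t = true) ∧
  (w = 0 ∨ ∃ t, res[w - 1]? = some t ∧ pvIsWordTok t = false)

-- the full simulation invariant for B's state
def pvInv (st : PvB) : Prop :=
  st.stack = pvUnm st.out ∧ pvW st.out st.wstart ∧
  (st.out.getLast? = some [')'] →
     (st.gstart.getD (st.out.length - 1) 0) + 1 ≤ st.out.length ∧
     pvScanA st.out ((st.out.length : Int) - 2) 1 = (st.gstart.getD (st.out.length - 1) 0 : Int) - 1 ∧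
     pvUnm (st.out.take (st.gstart.getD (st.out.length - 1) 0)) = pvUnm st.out)

theorem pvUnmAux_append (S : List Nat) (i : Nat) (xs ys : List (List Char)) :
    pvUnmAux S i (xs ++ ys) = pvUnmAux (pvUnmAux S i xs) (i + xs.length) ys := by
  induction xs generalizing S i with
  | nil => simp [pvUnmAux]
  | cons t ts ih => simp [pvUnmAux, ih]; ring_nf

theorem pvUnm_snoc (xs : List (List Char)) (t : List Char) :
    pvUnm (xs ++ [t]) = if t = ['('] then pvUnm xs ++ [xs.length]
      else if t = [')'] then (pvUnm xs).dropLast else pvUnm xs := by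
  simp [pvUnm, pvUnmAux_append, pvUnmAux]

theorem pvUnmAux_mem (S : List Nat) (i : Nat) (xs : List (List Char)) (p : Nat)
    (hp : p ∈ pvUnmAux S i xs) : p ∈ S ∨ (i ≤ p ∧ p < i + xs.length) := by
  induction xs generalizing S i with
  | nil => simpa [pvUnmAux] using Or.inl hp
  | cons t ts ih =>
    simp only [pvUnmAux] at hp
    rcases ih _ _ hp with h | h
    · split at h
      · rcases List.mem_append.1 h with h | h
        · exact Or.inl h
        · simp at h; right; simp; omega
      · split at h
        · exact Or.inl (List.dropLast_subset _ h)
        · exact Or.inl h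
    · right; simp; omega

theorem pvUnm_mem (xs : List (List Char)) (p : Nat) (hp : p ∈ pvUnm xs) : p < xs.length := by
  have := pvUnmAux_mem [] 0 xs p hp
  simp at this; omega

theorem pvUnm_take (xs : List (List Char)) (k p : Nat) (h : (pvUnm xs)[k]? = some p) :
    pvUnm (xs.take p) = (pvUnm xs).take k := by
  induction xs using List.reverseRecOn generalizing k with
  | nil => simp [pvUnm, pvUnmAux] at h
  | append_singleton xs t ih =>
    rw [pvUnm_snoc] at h ⊢
    by_cases ht1 : t = ['(']
    · simp only [if_pos ht1] at h ⊢
      rcases Nat.lt_trichotomy k (pvUnm xs).length with hk | hk | hk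
      · rw [List.getElem?_append_left hk] at h
        have hpmem : p ∈ pvUnm xs := by
          obtain ⟨hlt, he⟩ := List.getElem?_eq_some_iff.1 h
          exact he ▸ List.getElem_mem hlt
        have hplt := pvUnm_mem xs p hpmem
        rw [List.take_append_of_le_length (by omega), List.take_append_of_le_length (by omega)]
        exact ih k h
      · subst hk
        rw [List.getElem?_append_right (le_refl _)] at h
        simp at h
        subst h
        rw [List.take_append_of_le_length (le_refl xs.length), List.take_length,
          List.take_append_of_le_length (le_refl (pvUnm xs).length), List.take_length]
      · rw [List.getElem?_eq_none_iff.2 (by simp; omega)] at h; simp at h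
    · by_cases ht2 : t = [')']
      · simp only [if_neg ht1, if_pos ht2] at h ⊢
        rw [List.dropLast_eq_take, List.getElem?_take] at h
        split at h
        · rename_i hk
          have hpmem : p ∈ pvUnm xs := by
            obtain ⟨hlt, he⟩ := List.getElem?_eq_some_iff.1 h
            exact he ▸ List.getElem_mem hlt
          have hplt := pvUnm_mem xs p hpmem
          rw [List.take_append_of_le_length (by omega), List.dropLast_eq_take, List.take_take,
            Nat.min_eq_left (by omega)]
          exact ih k h
        · simp at h
      · simp only [if_neg ht1, if_neg ht2] at h ⊢
        have hpmem : p ∈ pvUnm xs := by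
          obtain ⟨hlt, he⟩ := List.getElem?_eq_some_iff.1 h
          exact he ▸ List.getElem_mem hlt
        have hplt := pvUnm_mem xs p hpmem
        rw [List.take_append_of_le_length (by omega)]
        exact ih k h

theorem pvUnmAux_no_paren (S : List Nat) (i : Nat) (ys : List (List Char))
    (h : ∀ t ∈ ys, t ≠ ['('] ∧ t ≠ [')']) : pvUnmAux S i ys = S := by
  induction ys generalizing S i with
  | nil => rfl
  | cons t ts ih =>
    have := h t (by simp)
    simp [pvUnmAux, this.1, this.2]
    exact ih _ _ (fun t ht => h t (by simp [ht]))

theorem pvUnm_append_no_paren (xs ys : List (List Char))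
    (h : ∀ t ∈ ys, t ≠ ['('] ∧ t ≠ [')']) : pvUnm (xs ++ ys) = pvUnm xs := by
  simp [pvUnm, pvUnmAux_append, pvUnmAux_no_paren _ _ _ h]

theorem pvScanA_prefix (xs ys : List (List Char)) (j c : Int) (hj : j < (xs.length : Int)) :
    pvScanA (xs ++ ys) j c = pvScanA xs j c := by
  conv_lhs => rw [pvScanA]
  conv_rhs => rw [pvScanA]
  by_cases h : 0 ≤ j ∧ 0 < c
  · simp only [dif_pos h]
    have hget : (xs ++ ys).getD j.toNat [] = xs.getD j.toNat [] :=
      List.getD_append _ _ _ _ (by omega)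
    rw [hget]
    exact pvScanA_prefix xs ys (j - 1) _ (by omega)
  · simp only [dif_neg h]
termination_by (j + 1).toNat
decreasing_by omega

theorem pvScanA_unm (xs : List (List Char)) (c : Nat) (hc : 1 ≤ c) :
    pvScanA xs ((xs.length : Int) - 1) (c : Int) =
      if c ≤ (pvUnm xs).length
      then ((pvUnm xs).getD ((pvUnm xs).length - c) 0 : Int) - 1 else -1 := by
  induction xs using List.reverseRecOn generalizing c with
  | nil =>
    rw [pvScanA]
    simp [pvUnm, pvUnmAux]
  | append_singleton xs t ih =>
    have hlen : ((xs ++ [t]).length : Int) - 1 = (xs.length : Int) := by simp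
    rw [hlen, pvScanA, dif_pos ⟨by omega, by exact_mod_cast hc⟩]
    have hget : (xs ++ [t]).getD (xs.length : Int).toNat [] = t := by
      simp [List.getD]
    rw [hget, pvUnm_snoc]
    by_cases ht1 : t = ['(']
    · simp only [if_pos ht1, if_neg (by simp [ht1] : ¬ t = [')'])]
      rcases Nat.lt_or_ge 1 c with hc2 | hc1
      · -- c ≥ 2: recurse
        have hcast : (c : Int) - 1 = ((c - 1 : Nat) : Int) := by omega
        rw [hcast, pvScanA_prefix xs [t] _ _ (by omega), ih (c - 1) (by omega)]
        have hlen2 : (pvUnm xs ++ [xs.length]).length = (pvUnm xs).length + 1 := by simp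
        rw [hlen2]
        by_cases hle : c - 1 ≤ (pvUnm xs).length
        · rw [if_pos hle, if_pos (by omega)]
          have : (pvUnm xs ++ [xs.length]).getD ((pvUnm xs).length + 1 - c) 0
              = (pvUnm xs).getD ((pvUnm xs).length - (c - 1)) 0 := by
            rw [List.getD_append _ _ _ _ (by omega)]
            congr 1
            omega
          rw [this]
        · rw [if_neg hle, if_neg (by omega)]
      · -- c = 1: inner call exits immediately
        have hc1' : c = 1 := by omega
        subst hc1'
        rw [pvScanA, dif_neg (by simp)]
        rw [if_pos (by simp)]
        have : (pvUnm xs ++ [xs.length]).getD ((pvUnm xs ++ [xs.length]).length - 1) 0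
            = xs.length := by simp [List.getD]
        rw [this]
    · by_cases ht2 : t = [')']
      · simp only [if_pos ht2, if_neg ht1]
        have hcast : (c : Int) + 1 = ((c + 1 : Nat) : Int) := by omega
        rw [hcast, pvScanA_prefix xs [t] _ _ (by omega), ih (c + 1) (by omega)]
        have hlen2 : (pvUnm xs).dropLast.length = (pvUnm xs).length - 1 := by simp
        rw [hlen2]
        by_cases hle : c + 1 ≤ (pvUnm xs).length
        · rw [if_pos hle, if_pos (by omega)]
          have : (pvUnm xs).dropLast.getD ((pvUnm xs).length - 1 - c) 0
              = (pvUnm xs).getD ((pvUnm xs).length - (c + 1)) 0 := by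
            rw [List.dropLast_eq_take]
            simp only [List.getD]
            rw [List.getElem?_take_of_lt (by omega)]
            congr 2
            omega
          rw [this]
        · rw [if_neg hle, if_neg (by omega)]
      · simp only [if_neg ht1, if_neg ht2]
        rw [pvScanA_prefix xs [t] _ _ (by omega)]
        exact ih c hc

theorem pvNotWrap_not_word (s : List Char) : pvIsWordTok (pvNotWrap s) = false := by
  simp [pvIsWordTok, pvNotWrap, PySem.Chars.strIsalnum]
  intro h
  exact absurd h (by decide)

theorem pvNotWrap_ne_parens (s : List Char) : pvNotWrap s ≠ ['('] ∧ pvNotWrap s ≠ [')'] := by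
  constructor <;> simp [pvNotWrap]

theorem pvWordTok_ne_parens (t : List Char) (h : pvIsWordTok t = true) :
    t ≠ ['('] ∧ t ≠ [')'] := by
  constructor <;> (rintro rfl; revert h; decide)

theorem pvPopVar_spec (res : List (List Char)) (w : Nat) :
    pvW res w → ∀ acc, pvPopVar res acc = (res.take w, res.drop w ++ acc) := by
  induction res using List.reverseRecOn with
  | nil =>
    intro hW acc
    obtain ⟨h1, _, _⟩ := hW
    simp at h1
    subst h1
    rw [pvPopVar]
    simp
  | append_singleton xs t ih =>
    intro hW acc
    obtain ⟨h1, h2, h3⟩ := hW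
    simp at h1
    rw [pvPopVar]
    split
    · rename_i u heq
      have hu : u = t := by symm; simpa using heq
      subst hu
      by_cases hw : w = xs.length + 1
      · have hnw : pvIsWordTok u = false := by
          obtain ⟨v, hv, hnv⟩ := h3.resolve_left (by omega)
          have : v = u := by
            rw [hw] at hv
            simpa using hv.symm
          exact this ▸ hnv
        rw [if_neg (by simp [hnw])]
        simp [hw, List.drop_eq_nil_of_le]
      · have hwle : w ≤ xs.length := by omega
        have hword : pvIsWordTok u = true := by
          apply h2
          rw [List.drop_append_of_le_length hwle]
          simp
        rw [if_pos hword, List.dropLast_concat]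
        have hWxs : pvW xs w := by
          refine ⟨hwle, ?_, ?_⟩
          · intro v hv
            apply h2
            rw [List.drop_append_of_le_length hwle]
            exact List.mem_append_left _ hv
          · rcases Nat.eq_zero_or_pos w with h0 | hpos
            · exact Or.inl h0
            · rcases h3 with h | ⟨v, hv, hnv⟩
              · exact Or.inl h
              · right
                refine ⟨v, ?_, hnv⟩
                rw [List.getElem?_append_left (by omega)] at hv
                exact hv
        rw [ih hWxs (u :: acc)]
        rw [List.take_append_of_le_length hwle, List.drop_append_of_le_length hwle]
        simp
    · rename_i heq
      simp at heq

theorem pvW_last_nonword (xs : List (List Char)) (t : List Char) (ht : pvIsWordTok t = false) :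
    pvW (xs ++ [t]) (xs.length + 1) := by
  refine ⟨by simp, ?_, Or.inr ⟨t, by simp, ht⟩⟩
  intro u hu
  simp [List.drop_eq_nil_of_le] at hu

theorem pvStepA_ne (res : List (List Char)) (c : Char) (h : res ≠ []) : pvStepA res c ≠ [] := by
  unfold pvStepA
  split
  · split
    · exact h
    · split <;> simp
  · simp

-- the one-step simulation
theorem pvIsWordTok_singleton (c : Char) :
    pvIsWordTok [c] = (PySem.Chars.isalnum c || c == '_') := by
  simp [pvIsWordTok, PySem.Chars.strIsalnum]

theorem pvStep_sim (res : List (List Char)) (st : PvB) (c : Char)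
    (hout : st.out = res) (hinv : pvInv st) (hne : res ≠ [] ∨ c ≠ '\'') :
    (pvStepB st c).out = pvStepA res c ∧ pvInv (pvStepB st c) := by
  subst hout
  obtain ⟨hI1, hW, hG⟩ := hinv
  by_cases hq : c = '\''
  · subst hq
    have hres : st.out ≠ [] := hne.resolve_right (by simp)
    by_cases hp : st.out.getLast? = some [')']
    · -- postfix NOT after a closing paren: the recorded group start replaces A's backward paren scan
      obtain ⟨hs1, hs2, hs3⟩ := hG hp
      have hB : pvStepB st '\'' =
          ⟨st.out.take (st.gstart.getD (st.out.length - 1) 0) ++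
              [pvNotWrap (st.out.drop (st.gstart.getD (st.out.length - 1) 0)).flatten],
            st.stack, st.gstart,
            (st.out.take (st.gstart.getD (st.out.length - 1) 0) ++
              [pvNotWrap (st.out.drop (st.gstart.getD (st.out.length - 1) 0)).flatten]).length⟩ := by
        simp [pvStepB, hp]
      have hscan : (pvScanA st.out ((st.out.length : Int) - 2) 1 + 1).toNat
          = st.gstart.getD (st.out.length - 1) 0 := by
        rw [hs2]; omega
      have hA : pvStepA st.out '\'' =
          st.out.take (st.gstart.getD (st.out.length - 1) 0) ++
            [pvNotWrap (st.out.drop (st.gstart.getD (st.out.length - 1) 0)).flatten] := by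
        rw [pvStepA, if_pos rfl, hp]
        simp [hscan]
      refine ⟨by rw [hA, hB], ?_⟩
      rw [hB]
      refine ⟨?_, ?_, ?_⟩
      · show st.stack = pvUnm _
        rw [pvUnm_append_no_paren _ _
          (by intro t ht; simp at ht; subst ht; exact pvNotWrap_ne_parens _), hs3]
        exact hI1
      · show pvW _ _
        have h := pvW_last_nonword (st.out.take (st.gstart.getD (st.out.length - 1) 0))
          (pvNotWrap (st.out.drop (st.gstart.getD (st.out.length - 1) 0)).flatten)
          (pvNotWrap_not_word _)
        simpa using h
      · intro h
        rw [List.getLast?_concat] at h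
        exact absurd (Option.some.inj h) (pvNotWrap_ne_parens _).2
    · -- postfix NOT after an identifier character (or a wrapped token): word_start replaces A's popping
      have hpv := pvPopVar_spec st.out st.wstart hW []
      obtain ⟨w1, w2, w3⟩ := hW
      have hB : pvStepB st '\'' =
          ⟨st.out.take st.wstart ++ [pvNotWrap (st.out.drop st.wstart).flatten],
            st.stack, st.gstart,
            (st.out.take st.wstart ++ [pvNotWrap (st.out.drop st.wstart).flatten]).length⟩ := by
        simp [pvStepB, hp]
      have hA : pvStepA st.out '\'' =
          st.out.take st.wstart ++ [pvNotWrap (st.out.drop st.wstart).flatten] := by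
        rw [pvStepA, if_pos rfl]
        cases hl : st.out.getLast? with
        | none => exact absurd (List.getLast?_eq_none_iff.1 hl) hres
        | some t =>
          have htne : t ≠ [')'] := fun h => hp (h ▸ hl)
          simp only [if_neg htne, hpv]
          simp
      have hsplit : pvUnm st.out = pvUnm (st.out.take st.wstart) := by
        conv_lhs => rw [← List.take_append_drop st.wstart st.out]
        exact pvUnm_append_no_paren _ _ (fun t ht => pvWordTok_ne_parens t (w2 t ht))
      refine ⟨by rw [hA, hB], ?_⟩
      rw [hB]
      refine ⟨?_, ?_, ?_⟩
      · show st.stack = pvUnm _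
        rw [pvUnm_append_no_paren _ _
          (by intro t ht; simp at ht; subst ht; exact pvNotWrap_ne_parens _), ← hsplit]
        exact hI1
      · show pvW _ _
        have h := pvW_last_nonword (st.out.take st.wstart)
          (pvNotWrap (st.out.drop st.wstart).flatten) (pvNotWrap_not_word _)
        simpa using h
      · intro h
        rw [List.getLast?_concat] at h
        exact absurd (Option.some.inj h) (pvNotWrap_ne_parens _).2
  · -- ordinary character: both sides append [c]
    have hA : pvStepA st.out c = st.out ++ [[c]] := by rw [pvStepA, if_neg hq]
    by_cases h1 : c = '('
    · subst h1
      have hB : pvStepB st '(' =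
          ⟨st.out ++ [['(']], st.stack ++ [st.out.length], st.gstart, st.out.length + 1⟩ := by
        simp [pvStepB]
      refine ⟨by rw [hA, hB], ?_⟩
      rw [hB]
      refine ⟨?_, ?_, ?_⟩
      · show _ = pvUnm _
        rw [pvUnm_snoc, if_pos rfl, hI1]
      · show pvW _ _
        simpa using pvW_last_nonword st.out ['('] (by decide)
      · intro h
        rw [List.getLast?_concat] at h
        simp at h
    · by_cases h2 : c = ')'
      · subst h2
        have hB : pvStepB st ')' =
            ⟨st.out ++ [[')']], st.stack.dropLast,
              st.gstart.insert st.out.length (st.stack.getLast?.getD 0),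
              st.out.length + 1⟩ := by
          simp [pvStepB]
        refine ⟨by rw [hA, hB], ?_⟩
        rw [hB]
        have hjeq : (((st.out ++ [[')']]).length : Int)) - 2 = (st.out.length : Int) - 1 := by
          simp; omega
        have hscan1 : pvScanA (st.out ++ [[')']]) (((st.out ++ [[')']]).length : Int) - 2) 1
            = pvScanA st.out ((st.out.length : Int) - 1) 1 := by
          rw [hjeq, pvScanA_prefix st.out [[')']] _ _ (by omega)]
        have hunm : pvUnm (st.out ++ [[')']]) = (pvUnm st.out).dropLast := by
          rw [pvUnm_snoc]; simp
        have hgd : (st.gstart.insert st.out.length (st.stack.getLast?.getD 0)).getD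
            ((st.out ++ [[')']]).length - 1) 0 = st.stack.getLast?.getD 0 := by
          have : (st.out ++ [[')']]).length - 1 = st.out.length := by simp
          rw [this, PySem.Dict.getD_insert_self]
        refine ⟨?_, ?_, ?_⟩
        · show _ = pvUnm _
          rw [hunm, hI1]
        · show pvW _ _
          simpa using pvW_last_nonword st.out [')'] (by decide)
        · intro _
          rw [hgd]
          rcases hlast : st.stack.getLast? with _ | p
          · have hnil : st.stack = [] := List.getLast?_eq_none_iff.1 hlast
            have hSnil : pvUnm st.out = [] := hI1 ▸ hnil
            refine ⟨by simp, ?_, ?_⟩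
            · have hu := pvScanA_unm st.out 1 (le_refl 1)
              norm_num at hu
              rw [hscan1, hu]
              simp [hSnil]
            · simp only [Option.getD_none, List.take_zero]
              rw [hunm, hSnil]
              simp [pvUnm, pvUnmAux]
          · have hmem : p ∈ pvUnm st.out := hI1 ▸ List.mem_of_getLast? hlast
            have hplt := pvUnm_mem _ _ hmem
            have hSne : pvUnm st.out ≠ [] := fun h => by simp [h] at hmem
            have hk : (pvUnm st.out)[(pvUnm st.out).length - 1]? = some p := by
              rw [← List.getLast?_eq_getElem?, ← hI1]
              exact hlast
            refine ⟨by simp; omega, ?_, ?_⟩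
            · have hu := pvScanA_unm st.out 1 (le_refl 1)
              norm_num at hu
              rw [hscan1, hu, if_pos (by have := List.length_pos_of_ne_nil hSne; omega)]
              simp only [hk, Option.getD_some]
            · simp only [Option.getD_some]
              rw [List.take_append_of_le_length (by omega), hunm,
                pvUnm_take st.out ((pvUnm st.out).length - 1) p hk,
                List.dropLast_eq_take]
      · have hB : pvStepB st c =
            ⟨st.out ++ [[c]], st.stack, st.gstart,
              if PySem.Chars.isalnum c || c == '_' then st.wstart else st.out.length + 1⟩ := by
          simp [pvStepB, hq, h1, h2]
        refine ⟨by rw [hA, hB], ?_⟩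
        rw [hB]
        obtain ⟨w1, w2, w3⟩ := hW
        refine ⟨?_, ?_, ?_⟩
        · show _ = pvUnm _
          rw [pvUnm_snoc, if_neg (show ¬([c] = ['(']) by simp [h1]),
            if_neg (show ¬([c] = [')']) by simp [h2])]
          exact hI1
        · show pvW (st.out ++ [[c]])
            (if PySem.Chars.isalnum c || c == '_' then st.wstart else st.out.length + 1)
          split
          · rename_i hword
            refine ⟨by simp; omega, ?_, ?_⟩
            · intro t ht
              rw [List.drop_append_of_le_length w1] at ht
              rcases List.mem_append.1 ht with h | h
              · exact w2 t h
              · simp at h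
                subst h
                rw [pvIsWordTok_singleton]
                exact hword
            · rcases w3 with h | ⟨u, hu, hnu⟩
              · exact Or.inl h
              · rcases Nat.eq_zero_or_pos st.wstart with h0 | hpos
                · exact Or.inl h0
                · right
                  refine ⟨u, ?_, hnu⟩
                  rw [List.getElem?_append_left (by omega)]
                  exact hu
          · rename_i hword
            have hnw : pvIsWordTok [c] = false := by
              rw [pvIsWordTok_singleton]
              simpa using hword
            simpa using pvW_last_nonword st.out [c] hnw
        · intro h
          rw [List.getLast?_concat] at h
          have : c = ')' := by simpa using h
          exact absurd this h2

theorem pvFold_sim (l : List Char) (res : List (List Char)) (st : PvB)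
    (hout : st.out = res) (hinv : pvInv st) (hne : res ≠ []) :
    (l.foldl pvStepB st).out = l.foldl pvStepA res ∧ pvInv (l.foldl pvStepB st) ∧
      l.foldl pvStepA res ≠ [] := by
  induction l generalizing res st with
  | nil => exact ⟨hout, hinv, hne⟩
  | cons c cs ih =>
    obtain ⟨h1, h2⟩ := pvStep_sim res st c hout hinv (Or.inl hne)
    simpa using ih (pvStepA res c) (pvStepB st c) h1 h2 (pvStepA_ne res c hne)

theorem pvInv_init : pvInv ⟨[], [], PySem.Dict.empty, 0⟩ := by
  refine ⟨rfl, ⟨by simp, by simp, Or.inl rfl⟩, by simp⟩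

-- ===== VERDICT (by name: the statement is the Claim_ definition above) =====
theorem convert_postfix_not_py_spec : Claim_equal_convert_postfix_not_py := by
  intro expr _ hpre
  unfold Spec_convert_postfix_not_py convert_postfix_not_py convert_postfix_not_py_alt
  rcases hl : expr.toList with _ | ⟨c, cs⟩
  · rfl
  · have hc : c ≠ '\'' := by
      unfold Pre_convert_postfix_not_py at hpre
      rw [hl] at hpre; simpa using hpre
    obtain ⟨h1, h2⟩ := pvStep_sim [] ⟨[], [], PySem.Dict.empty, 0⟩ c rfl pvInv_init (Or.inr hc)
    have hne : pvStepA [] c ≠ [] := by simp [pvStepA, hc]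
    obtain ⟨he, _, _⟩ := pvFold_sim cs (pvStepA [] c) (pvStepB ⟨[], [], PySem.Dict.empty, 0⟩ c) h1 h2 hne
    simp [List.foldl_cons, he]
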